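-- pv_equiv track=rewrite | github.com/marmin-dev/ThisIsCodingTest | programmers/level1/lottos_draw.py | solution
-- ===== SOURCE A (Python) =====
-- def solution(lottos, win_nums):
--     lottos2 = []
--     count = 0
--     answer = []
--     for a in lottos:
--         if a != 0:
--             lottos2.append(a)
--     count_0 = len(lottos) - len(lottos2)
--     for a in lottos2:
--         if a in win_nums:
--             count += 1
--     if count > 0:
--         answer.append(7 - count - count_0)
--         answer.append(7 - count)
--     else:
--         if count_0 == 0:
--             answer.append(6)
--         else:
--             answer.append(7 - count_0)
--         answer.append(6)
--     return answer
-- ===== SOURCE B (Python) =====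
-- def solution(lottos, win_nums):
--     cnt = {}
--     for a in lottos:
--         cnt[a] = cnt.get(a, 0) + 1
--     matches = sum(cnt.get(w, 0) for w in set(win_nums) if w != 0)
--     zeros = cnt.get(0, 0)
--     return [min(6, 7 - matches - zeros), min(6, 7 - matches)]
-- ===== Notes on version B (the rewrite author's own statement) =====
-- stated objective: faster
-- what changed: B inverts the traversal: instead of A's zero-filtered copy of lottos scanned with an O(m) membership test against win_nums per element, B builds a frequency dictionary of lottos once and tallies the matches from the winning side, summing the counter entries of the distinct non-zero winning numbers; the four-way branch becomes the closed form min(6, 7 - matches).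
import Mathlib
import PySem

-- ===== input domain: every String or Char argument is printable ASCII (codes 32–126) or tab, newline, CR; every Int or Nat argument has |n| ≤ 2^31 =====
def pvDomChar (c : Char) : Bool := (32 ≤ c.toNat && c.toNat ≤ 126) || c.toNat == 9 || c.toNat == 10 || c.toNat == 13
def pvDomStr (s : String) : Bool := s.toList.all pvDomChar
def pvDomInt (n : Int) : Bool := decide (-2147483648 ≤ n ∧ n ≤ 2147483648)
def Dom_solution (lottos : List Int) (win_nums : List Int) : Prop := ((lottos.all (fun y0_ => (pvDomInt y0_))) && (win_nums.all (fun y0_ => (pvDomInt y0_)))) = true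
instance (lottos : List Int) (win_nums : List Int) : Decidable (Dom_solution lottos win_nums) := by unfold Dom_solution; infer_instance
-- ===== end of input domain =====

-- B inverts the traversal: a frequency dictionary of lottos is built once and the matches are
-- tallied from the winning side (sum of counter entries over the distinct non-zero winning
-- numbers), with min(6, 7 - matches) replacing A's four-way branch; objective: faster (hash counting removes the inner membership scan).

-- ===== PORT A =====
def solution (lottos : List Int) (win_nums : List Int) : List Int :=
  let lottos2 := lottos.foldl (fun acc a => if a ≠ 0 then acc ++ [a] else acc) ([] : List Int)
  let count_0 : Int := (lottos.length : Int) - (lottos2.length : Int)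
  let count : Int := lottos2.foldl (fun c a => if a ∈ win_nums then c + 1 else c) 0
  if count > 0 then
    [7 - count - count_0, 7 - count]
  else if count_0 = 0 then
    [6, 6]
  else
    [7 - count_0, 6]

-- ===== PORT B =====
def solution_alt (lottos : List Int) (win_nums : List Int) : List Int :=
  let cnt : PySem.Dict Int Int :=
    lottos.foldl (fun d a => d.insert a (d.getD a 0 + 1)) PySem.Dict.empty
  let mtch : Int :=
    (((PySem.Set.ofList win_nums).filter (fun w => !(w == 0))).map (fun w => cnt.getD w 0)).sum
  let zeros : Int := cnt.getD 0 0
  [min 6 (7 - mtch - zeros), min 6 (7 - mtch)]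

-- ===== PRECONDITION & SPEC =====
def Spec_solution (lottos : List Int) (win_nums : List Int) (out : List Int) : Prop := out = solution_alt lottos win_nums
instance (lottos : List Int) (win_nums : List Int) (out : List Int) : Decidable (Spec_solution lottos win_nums out) := by unfold Spec_solution; infer_instance

-- ===== CLAIM (what is proved, stated in full; the proofs are below) =====
def Claim_equal_solution : Prop := ∀ (lottos : List Int) (win_nums : List Int), Dom_solution lottos win_nums → Spec_solution lottos win_nums (solution lottos win_nums)

-- ===== LEMMAS AND PROOFS =====

-- Summing occurrence counts over a duplicate-free list of keys counts the members of that list.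
theorem sum_count_nodup (L : List Int) (hL : L.Nodup) (xs : List Int) :
    (L.map (fun w => ((xs.count w : Nat) : Int))).sum
      = ((xs.countP (fun a => decide (a ∈ L)) : Nat) : Int) := by
  induction xs with
  | nil => simp
  | cons x xs ih =>
    have hsum : (L.map (fun w => (((x :: xs).count w : Nat) : Int))).sum
        = (L.map (fun w => ((xs.count w : Nat) : Int))).sum
          + (L.map (fun w => if x = w then (1 : Int) else 0)).sum := by
      rw [← PySem.List.sum_map_add_int]
      refine congrArg List.sum (List.map_congr_left fun w _ => ?_)
      by_cases h : x = w <;> simp [h]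
    have hind : (L.map (fun w => if x = w then (1 : Int) else 0)).sum
        = if x ∈ L then (1 : Int) else 0 := by
      have hmap : L.map (fun w => if x = w then (1 : Int) else 0)
          = L.map (fun w => if (w == x) then (1 : Int) else 0) :=
        List.map_congr_left fun w _ => by
          by_cases h : x = w
          · simp [h]
          · have hb : (w == x) = false := by
              simp only [beq_eq_false_iff_ne, ne_eq]
              exact fun he => h he.symm
            simp [h, hb]
      rw [hmap, PySem.List.sum_map_ite_one_zero]
      by_cases h : x ∈ L
      · rw [show L.countP (· == x) = L.count x from rfl, List.count_eq_one_of_mem hL h]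
        simp [h]
      · rw [show L.countP (· == x) = L.count x from rfl, List.count_eq_zero_of_not_mem h]
        simp [h]
    rw [hsum, ih, hind, List.countP_cons]
    by_cases h : x ∈ L <;> simp [h]
 
-- zeros removed by A's filter = zeros counted
theorem length_sub_filter (lottos : List Int) :
    (lottos.length : Int) - ((lottos.filter (fun a => decide (a ≠ 0))).length : Int)
      = (lottos.count 0 : Int) := by
  induction lottos with
  | nil => rfl
  | cons x xs ih =>
    simp only [ne_eq, decide_not] at ih
    by_cases h : x = 0 <;>
      simp [h] <;> omega

theorem solution_eq (lottos win_nums : List Int) :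
    solution lottos win_nums = solution_alt lottos win_nums := by
  unfold solution solution_alt
  dsimp only
  rw [PySem.List.foldl_append_ite_eq_filter, PySem.List.foldl_ite_add_one]
  simp only [List.nil_append, zero_add]
  -- rewrite B's dictionary lookups into counts
  have hget : ∀ w : Int,
      (lottos.foldl (fun d a => d.insert a (d.getD a 0 + 1)) PySem.Dict.empty).getD w 0
        = ((lottos.count w : Nat) : Int) := by
    intro w
    rw [PySem.Dict.getD_foldl_insert_add_one, PySem.Dict.getD_empty]
    simp
  have hL : ((PySem.Set.ofList win_nums).filter (fun w => !(w == 0))).Nodup :=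
    (PySem.Set.nodup_ofList win_nums).filter _
  have hmatches :
      (((PySem.Set.ofList win_nums).filter (fun w => !(w == 0))).map
          (fun w => (lottos.foldl (fun d a => d.insert a (d.getD a 0 + 1))
            PySem.Dict.empty).getD w 0)).sum
        = (((lottos.filter (fun a => decide (a ≠ 0))).countP
            (fun a => decide (a ∈ win_nums)) : Nat) : Int) := by
    rw [List.map_congr_left (fun w _ => hget w), sum_count_nodup _ hL]
    rw [List.countP_filter]
    congr 1
    refine List.countP_congr fun a _ => ?_
    simp [List.mem_filter, PySem.Set.mem_ofList]
  rw [hmatches, hget 0, length_sub_filter]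
  have hc : (0 : Int) ≤ (((lottos.filter (fun a => decide (a ≠ 0))).countP
      (fun a => decide (a ∈ win_nums)) : Nat) : Int) := Int.natCast_nonneg _
  have hz : (0 : Int) ≤ ((lottos.count 0 : Nat) : Int) := Int.natCast_nonneg _
  split_ifs with h1 h2 <;> simp only [List.cons.injEq, and_true] <;>
    constructor <;> omega

-- ===== VERDICT (by name: the statement is the Claim_ definition above) =====
theorem solution_spec : Claim_equal_solution := by
  intro lottos win_nums _
  unfold Spec_solution
  exact solution_eq lottos win_nums
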